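-- pv_equiv track=rewrite | github.com/unicamp-dl/Lissard | src/repeat_copy_logic/ukrainian.py | x_hello_world_not_say_world_every_even_time
-- ===== SOURCE A (Python) =====
-- def x_hello_world_not_say_world_every_even_time(times):
--     '''
--     'say hello world five times, but don't say world every even time',
--     '''
--     out = ''
--     count = 0
--     for x in range(0, times):
--         if count == 1:
--             out+='привіт '
--             count=0
--         else:
--             out+='привіт світ '
--             count+=1
--     return out.strip()
-- ===== SOURCE B (Python) =====
-- def x_hello_world_not_say_world_every_even_time(times):
--     n = max(times, 0)
--     parts = ['привіт світ привіт'] * (n // 2) + ['привіт світ'] * (n % 2)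
--     return ' '.join(parts)
-- ===== Notes on version B (the rewrite author's own statement) =====
-- stated objective: simpler
-- what changed: Replaces A's per-iteration toggling accumulator loop followed by strip() with a closed form: half as many constant two-phrase blocks plus an optional odd tail, joined with a single space so no trailing space (and no strip) ever arises.
import Mathlib
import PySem

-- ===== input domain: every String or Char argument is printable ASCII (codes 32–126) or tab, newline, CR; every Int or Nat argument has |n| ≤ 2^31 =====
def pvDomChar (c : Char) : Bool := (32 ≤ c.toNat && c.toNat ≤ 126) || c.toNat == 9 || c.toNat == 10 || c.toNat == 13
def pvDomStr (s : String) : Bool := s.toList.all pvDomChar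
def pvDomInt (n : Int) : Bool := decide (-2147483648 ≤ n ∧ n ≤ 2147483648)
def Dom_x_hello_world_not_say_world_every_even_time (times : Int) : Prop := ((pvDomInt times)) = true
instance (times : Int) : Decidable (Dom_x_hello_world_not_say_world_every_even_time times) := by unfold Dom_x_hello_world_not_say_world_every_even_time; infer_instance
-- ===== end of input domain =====

-- B replaces A's toggling-accumulator loop with a closed-form block repetition
-- (q = n//2 two-word+one-word blocks, plus one trailing pair if n is odd) joined
-- by spaces, so no trailing space is ever produced and no strip is needed; objective: simpler.

-- ===== PORT A =====
-- the accumulator `out` is modelled as List Char (exact for Python str concatenation);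
-- the final value is stripped with PySem.Chars.strip and converted with String.ofList.
def pvStepA (st : List Char × Int) : List Char × Int :=
  if st.2 == 1 then (st.1 ++ "привіт ".toList, 0)
  else (st.1 ++ "привіт світ ".toList, st.2 + 1)

def x_hello_world_not_say_world_every_even_time (times : Int) : String :=
  let res := (PySem.List.pyRange 0 times).foldl (fun st _x => pvStepA st) (([] : List Char), (0 : Int))
  String.ofList (PySem.Chars.strip res.1)

-- ===== PORT B =====
def x_hello_world_not_say_world_every_even_time_alt (times : Int) : String :=
  let n := max times 0
  let parts := List.replicate (PySem.Int.floordiv n 2).toNat "привіт світ привіт" ++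
               List.replicate (PySem.Int.mod n 2).toNat "привіт світ"
  PySem.Str.join " " parts

-- ===== PRECONDITION & SPEC =====
def Spec_x_hello_world_not_say_world_every_even_time (times : Int) (out : String) : Prop := out = x_hello_world_not_say_world_every_even_time_alt times
instance (times : Int) (out : String) : Decidable (Spec_x_hello_world_not_say_world_every_even_time times out) := by unfold Spec_x_hello_world_not_say_world_every_even_time; infer_instance

-- ===== CLAIM (what is proved, stated in full; the proofs are below) =====
def Claim_equal_x_hello_world_not_say_world_every_even_time : Prop := ∀ (times : Int), Dom_x_hello_world_not_say_world_every_even_time times → Spec_x_hello_world_not_say_world_every_even_time times (x_hello_world_not_say_world_every_even_time times)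

-- ===== LEMMAS AND PROOFS =====

-- A's loop body ignores the loop variable, so the fold is an iterate of pvStepA.
theorem pv_foldl_iter (l : List Int) (st : List Char × Int) :
    l.foldl (fun s _ => pvStepA s) st = pvStepA^[l.length] st := by
  induction l generalizing st with
  | nil => rfl
  | cons x xs ih => simp [List.foldl_cons, ih, Function.iterate_succ_apply]

-- the string built by n iterations of A's loop
def pvP : Nat → List Char
  | 0 => []
  | n + 1 => pvP n ++ (if n % 2 == 0 then "привіт світ ".toList else "привіт ".toList)

theorem pv_iter_eq (n : Nat) :
    pvStepA^[n] (([] : List Char), (0 : Int)) = (pvP n, ((n % 2 : Nat) : Int)) := by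
  induction n with
  | zero => rfl
  | succ n ih =>
    rw [Function.iterate_succ_apply', ih]
    by_cases h : n % 2 = 0
    · have h1 : (n + 1) % 2 = 1 := by omega
      simp [pvStepA, pvP, h, h1]
    · have h2 : n % 2 = 1 := by omega
      have h3 : (n + 1) % 2 = 0 := by omega
      simp [pvStepA, pvP, h2, h3]

-- q full blocks
def pvW (q : Nat) : List Char := (List.replicate q "привіт світ привіт ".toList).flatten

theorem pvW_succ (q : Nat) : pvW (q + 1) = "привіт світ привіт ".toList ++ pvW q := by
  simp [pvW, List.replicate_succ]

theorem pvW_succ' (q : Nat) : pvW (q + 1) = pvW q ++ "привіт світ привіт ".toList := by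
  simp [pvW, List.replicate_succ']

theorem pvP_closed (q : Nat) :
    pvP (2 * q) = pvW q ∧ pvP (2 * q + 1) = pvW q ++ "привіт світ ".toList := by
  induction q with
  | zero => constructor <;> simp [pvP, pvW]
  | succ q ih =>
    have h2 : 2 * (q + 1) = (2 * q + 1) + 1 := by ring
    have hcat : "привіт світ ".toList ++ "привіт ".toList = "привіт світ привіт ".toList := by decide
    have hm : (2 * q + 1) % 2 = 1 := by omega
    have hfst : pvP (2 * (q + 1)) = pvW (q + 1) := by
      rw [h2]
      show pvP (2 * q + 1) ++ _ = _
      rw [ih.2, pvW_succ' q, hm]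
      simp [← hcat]
    constructor
    · exact hfst
    · have hm0 : (2 * (q + 1)) % 2 = 0 := by omega
      show pvP (2 * (q + 1)) ++ _ = _
      rw [hfst, hm0]
      simp

-- B's joined string for q blocks and r ∈ {0,1} trailing pairs (char level)
def pvT (q r : Nat) : List Char :=
  PySem.Chars.join [' ']
    (List.replicate q "привіт світ привіт".toList ++ List.replicate r "привіт світ".toList)

theorem pvT_W0 (q : Nat) : pvT (q + 1) 0 ++ [' '] = pvW (q + 1) := by
  induction q with
  | zero => decide
  | succ q ih =>
    have : pvT (q + 2) 0 = "привіт світ привіт".toList ++ [' '] ++ pvT (q + 1) 0 := by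
      simp only [pvT, List.replicate_succ, List.cons_append] at *
      rw [PySem.Chars.join_cons_cons]
    rw [this, pvW_succ (q + 1), ← ih]
    simp

theorem pvT_W1 (q : Nat) : pvT q 1 ++ [' '] = pvW q ++ "привіт світ ".toList := by
  induction q with
  | zero => decide
  | succ q ih =>
    rcases e : List.replicate q "привіт світ привіт".toList ++ "привіт світ".toList :: List.replicate 0 "привіт світ".toList with _ | ⟨b, rest⟩
    · exfalso; simpa using congrArg List.length e
    · have : pvT (q + 1) 1 = "привіт світ привіт".toList ++ [' '] ++ pvT q 1 := by
        simp only [pvT, List.replicate_succ, List.cons_append]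
        rw [e, PySem.Chars.join_cons_cons, ← e]
      rw [this, pvW_succ q]
      simp only [List.append_assoc]
      rw [ih]
      have hx : "привіт світ привіт".toList ++ [' '] = "привіт світ привіт ".toList := by decide
      rw [← hx]
      simp

theorem pv_lstrip_cons {c : Char} (xs : List Char) (h : PySem.Chars.isspace c = false) :
    PySem.Chars.lstrip (c :: xs) = c :: xs := by
  simp [PySem.Chars.lstrip, h]

theorem pv_rstrip_space (xs : List Char) :
    PySem.Chars.rstrip (xs ++ [' ']) = PySem.Chars.rstrip xs := by
  have : PySem.Chars.isspace ' ' = true := by decide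
  simp [PySem.Chars.rstrip, this]

theorem pv_rstrip_last {c : Char} (xs : List Char) (h : PySem.Chars.isspace c = false) :
    PySem.Chars.rstrip (xs ++ [c]) = xs ++ [c] := by
  simp [PySem.Chars.rstrip, h]

theorem pv_strip_P (m : Nat) : PySem.Chars.strip (pvP m) = pvT (m / 2) (m % 2) := by
  have hqr : m = 2 * (m / 2) + m % 2 := by omega
  set q := m / 2 with hq
  have hr : m % 2 = 0 ∨ m % 2 = 1 := by omega
  have hπ : PySem.Chars.isspace 'п' = false := by decide
  have hts : PySem.Chars.isspace 'т' = false := by decide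
  rcases hr with hr | hr
  · rw [hr]
    have hm : m = 2 * q := by omega
    rw [hm, (pvP_closed q).1]
    cases q with
    | zero => decide
    | succ q =>
      have hT : pvT (q + 1) 0 = pvW q ++ "привіт світ привіт".toList := by
        apply List.append_cancel_right (bs := [' '])
        rw [pvT_W0, pvW_succ' q,
          show "привіт світ привіт ".toList = "привіт світ привіт".toList ++ [' '] from by decide]
        simp
      have hcons : pvW (q + 1) = 'п' :: ("ривіт світ привіт ".toList ++ pvW q) := by
        rw [pvW_succ, show "привіт світ привіт ".toList = 'п' :: "ривіт світ привіт ".toList from by decide]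
        simp
      show PySem.Chars.rstrip (PySem.Chars.lstrip (pvW (q + 1))) = _
      rw [hcons, pv_lstrip_cons _ hπ, ← hcons, ← pvT_W0 q, pv_rstrip_space, hT,
        show "привіт світ привіт".toList = "привіт світ приві".toList ++ ['т'] from by decide,
        ← List.append_assoc, pv_rstrip_last _ hts]
  · rw [hr]
    have hm : m = 2 * q + 1 := by omega
    rw [hm, (pvP_closed q).2]
    have hT : pvT q 1 = pvW q ++ "привіт світ".toList := by
      apply List.append_cancel_right (bs := [' '])
      rw [pvT_W1, show "привіт світ ".toList = "привіт світ".toList ++ [' '] from by decide]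
      simp
    have hcons : ∃ t, pvW q ++ "привіт світ ".toList = 'п' :: t := by
      cases q with
      | zero => exact ⟨"ривіт світ ".toList, by decide⟩
      | succ q =>
        refine ⟨"ривіт світ привіт ".toList ++ pvW q ++ "привіт світ ".toList, ?_⟩
        rw [pvW_succ, show "привіт світ привіт ".toList = 'п' :: "ривіт світ привіт ".toList from by decide]
        simp
    obtain ⟨t, ht⟩ := hcons
    show PySem.Chars.rstrip (PySem.Chars.lstrip _) = _
    rw [ht, pv_lstrip_cons _ hπ, ← ht, ← pvT_W1 q, pv_rstrip_space, hT,
      show "привіт світ".toList = "привіт сві".toList ++ ['т'] from by decide,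
      ← List.append_assoc, pv_rstrip_last _ hts]

theorem pv_alt_toList (times : Int) :
    (x_hello_world_not_say_world_every_even_time_alt times).toList
      = pvT (times.toNat / 2) (times.toNat % 2) := by
  unfold x_hello_world_not_say_world_every_even_time_alt
  have hmax : max times 0 = (times.toNat : Int) := (Int.ofNat_toNat times).symm
  have hq : (PySem.Int.floordiv (max times 0) 2).toNat = times.toNat / 2 := by
    rw [hmax]
    simp [PySem.Int.floordiv, Int.fdiv_eq_ediv]
    omega
  have hr : (PySem.Int.mod (max times 0) 2).toNat = times.toNat % 2 := by
    rw [hmax]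
    simp [PySem.Int.mod, Int.fmod_eq_emod]
    omega
  rw [PySem.Str.toList_join, hq, hr]
  simp [pvT, List.map_replicate]

-- ===== VERDICT (by name: the statement is the Claim_ definition above) =====
theorem x_hello_world_not_say_world_every_even_time_spec : Claim_equal_x_hello_world_not_say_world_every_even_time := by
  intro times _
  unfold Spec_x_hello_world_not_say_world_every_even_time
  unfold x_hello_world_not_say_world_every_even_time
  rw [pv_foldl_iter, PySem.List.length_pyRange_one]
  simp only [Int.sub_zero]
  rw [pv_iter_eq, pv_strip_P]
  rw [← pv_alt_toList times]
  exact String.ofList_toList
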